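-- pv_equiv track=rewrite | github.com/Leftfish/Advent-of-Code-2020 | 24/d24.py | parse_tile
-- ===== SOURCE A (Python) =====
-- def parse_tile(tile, dirs):
--     moves = []
--     i = 0
--     while i < len(tile):
--         pair = tile[i:i+2]
--         if pair in ('nw', 'ne', 'sw', 'se'):
--             moves.append(dirs[pair])
--             i += 2
--         else:
--             moves.append(dirs[tile[i]])
--             i += 1
--     return moves
-- ===== SOURCE B (Python) =====
-- def parse_tile(tile, dirs):
--     moves = []
--     pending = ''
--     for c in tile:
--         if c in 'ns':
--             pending = c
--         else:
--             moves.append(dirs[pending + c])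
--             pending = ''
--     return moves
-- ===== Notes on version B (the rewrite author's own statement) =====
-- stated objective: alternative
-- what changed: Replaces A's two-character slice lookahead with manual index stepping by a single per-character pass that carries a one-character pending accumulator (a small state machine).
-- outside the precondition, e.g. on parse_tile('n', {'n': (1, 2)}): A returns [(1, 2)], B returns []
import Mathlib
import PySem

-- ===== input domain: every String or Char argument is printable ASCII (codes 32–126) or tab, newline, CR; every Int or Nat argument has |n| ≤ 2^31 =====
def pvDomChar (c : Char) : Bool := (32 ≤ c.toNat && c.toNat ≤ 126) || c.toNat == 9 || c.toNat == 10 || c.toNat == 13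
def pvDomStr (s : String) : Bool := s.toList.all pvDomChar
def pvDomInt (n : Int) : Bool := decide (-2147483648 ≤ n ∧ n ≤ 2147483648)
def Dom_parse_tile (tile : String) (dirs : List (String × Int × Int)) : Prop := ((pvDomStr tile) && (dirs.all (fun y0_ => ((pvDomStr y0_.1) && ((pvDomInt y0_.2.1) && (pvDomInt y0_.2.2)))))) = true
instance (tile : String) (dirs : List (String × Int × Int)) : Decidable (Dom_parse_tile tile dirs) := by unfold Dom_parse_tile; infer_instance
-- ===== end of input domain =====

-- B rewrites A's two-char slice lookahead as a single per-character pass with a one-char pending accumulator (alternative decomposition, same cost).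
-- dict lookup (first match in the association list); KeyError = none
def pvLookup (dirs : List (String × Int × Int)) (k : String) : Option (Int × Int) :=
  (dirs.find? (fun p => p.1 == k)).map (·.2)

-- ===== PORT A =====
-- while loop over the index; tile[i:i+2] is the head char plus at most one following char;
-- on KeyError (pvLookup = none) Pre_ excludes the input, the port uses a junk default there
def parse_tileA (dirs : List (String × Int × Int)) : List Char → List (Int × Int)
  | [] => []
  | c :: rest =>
    let pair := c :: rest.take 1          -- tile[i:i+2]
    if pair = ['n','w'] ∨ pair = ['n','e'] ∨ pair = ['s','w'] ∨ pair = ['s','e'] then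
      (pvLookup dirs (String.ofList pair)).getD (0, 0) :: parse_tileA dirs (rest.drop 1)   -- i += 2
    else
      (pvLookup dirs (String.ofList [c])).getD (0, 0) :: parse_tileA dirs rest             -- i += 1
  termination_by l => l.length
  decreasing_by
    all_goals simp
    all_goals omega

def parse_tile (tile : String) (dirs : List (String × Int × Int)) : List (Int × Int) :=
  parse_tileA dirs tile.toList

-- ===== PORT B =====
-- one fold over the characters carrying (moves, pending)
def parse_tileB_step (dirs : List (String × Int × Int))
    (st : List (Int × Int) × List Char) (c : Char) : List (Int × Int) × List Char :=
  if c = 'n' ∨ c = 's' then (st.1, [c])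
  else (st.1 ++ [(pvLookup dirs (String.ofList (st.2 ++ [c]))).getD (0, 0)], [])

def parse_tile_alt (tile : String) (dirs : List (String × Int × Int)) : List (Int × Int) :=
  (tile.toList.foldl (parse_tileB_step dirs) ([], [])).1

-- ===== PRECONDITION & SPEC =====
-- Pre_ excludes malformed tiles where an 'n'/'s' is not immediately followed by 'e'/'w' (A's
-- single-char fallback lookup there usually raises KeyError, and when the stray key happens to be
-- in dirs A's value is an artefact of its lookahead while B drops the dangling accumulator), and
-- inputs on which a needed direction key is absent from dirs (A raises KeyError).
def Pre_parse_tile (tile : String) (dirs : List (String × Int × Int)) : Prop :=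
  ∀ i, i < tile.toList.length →
    (((tile.toList.getD i ' ' = 'n' ∨ tile.toList.getD i ' ' = 's') →
        i + 1 < tile.toList.length ∧
        (tile.toList.getD (i+1) ' ' = 'e' ∨ tile.toList.getD (i+1) ' ' = 'w') ∧
        (pvLookup dirs (String.ofList [tile.toList.getD i ' ', tile.toList.getD (i+1) ' '])).isSome = true) ∧
     (¬ (tile.toList.getD i ' ' = 'n' ∨ tile.toList.getD i ' ' = 's') →
        (i = 0 ∨ ¬ (tile.toList.getD (i-1) ' ' = 'n' ∨ tile.toList.getD (i-1) ' ' = 's')) →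
        (pvLookup dirs (String.ofList [tile.toList.getD i ' '])).isSome = true))
instance (tile : String) (dirs : List (String × Int × Int)) : Decidable (Pre_parse_tile tile dirs) := by
  unfold Pre_parse_tile; infer_instance

def pvWitness_parse_tile : String × (List (String × Int × Int)) :=
  ("nwe", [("nw", (1, 0)), ("e", (2, 3))])

def Spec_parse_tile (tile : String) (dirs : List (String × Int × Int)) (out : List (Int × Int)) : Prop := out = parse_tile_alt tile dirs
instance (tile : String) (dirs : List (String × Int × Int)) (out : List (Int × Int)) : Decidable (Spec_parse_tile tile dirs out) := by unfold Spec_parse_tile; infer_instance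

-- ===== CLAIM (what is proved, stated in full; the proofs are below) =====
def Claim_equal_parse_tile : Prop := ∀ (tile : String) (dirs : List (String × Int × Int)), Dom_parse_tile tile dirs → Pre_parse_tile tile dirs → Spec_parse_tile tile dirs (parse_tile tile dirs)

-- ===== LEMMAS AND PROOFS =====

-- the part of Pre_ the equivalence actually needs: every 'n'/'s' is followed by 'e'/'w'
def pvWF (cs : List Char) : Prop :=
  ∀ i, i < cs.length → (cs.getD i ' ' = 'n' ∨ cs.getD i ' ' = 's') →
    i + 1 < cs.length ∧ (cs.getD (i+1) ' ' = 'e' ∨ cs.getD (i+1) ' ' = 'w')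

theorem pvWF_tail {c : Char} {cs : List Char} (h : pvWF (c :: cs)) : pvWF cs := by
  intro i hi hc
  have := h (i+1) (by simp; omega) (by simpa using hc)
  simp at this
  exact ⟨by omega, by simpa using this.2⟩

theorem pv_main (dirs : List (String × Int × Int)) :
    ∀ n (cs : List Char), cs.length ≤ n → pvWF cs →
      ∀ acc, cs.foldl (parse_tileB_step dirs) (acc, ([] : List Char))
        = (acc ++ parse_tileA dirs cs, []) := by
  intro n
  induction n with
  | zero =>
    intro cs hlen _ acc
    have : cs = [] := by cases cs <;> simp_all
    subst this; simp [parse_tileA]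
  | succ n ih =>
    intro cs hlen hwf acc
    match cs with
    | [] => simp [parse_tileA]
    | c :: rest =>
      by_cases hc : c = 'n' ∨ c = 's'
      · have h0 := hwf 0 (by simp) (by simpa using hc)
        match rest with
        | [] => simp at h0
        | d :: rest' =>
          have hd : d = 'e' ∨ d = 'w' := by simpa using h0.2
          have hdns : ¬ (d = 'n' ∨ d = 's') := by rcases hd with h | h <;> subst h <;> simp
          have hpair : ([c, d] = ['n','w'] ∨ [c, d] = ['n','e'] ∨ [c, d] = ['s','w'] ∨ [c, d] = ['s','e']) := by
            rcases hc with h1 | h1 <;> rcases hd with h2 | h2 <;> subst h1 <;> subst h2 <;> simp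
          have hrec := ih rest' (by simp at hlen ⊢; omega) (pvWF_tail (pvWF_tail hwf))
            (acc ++ [(pvLookup dirs (String.ofList [c, d])).getD (0, 0)])
          calc ((c :: d :: rest').foldl (parse_tileB_step dirs) (acc, ([] : List Char)))
              = rest'.foldl (parse_tileB_step dirs)
                  (acc ++ [(pvLookup dirs (String.ofList [c, d])).getD (0, 0)], []) := by
                simp [List.foldl, parse_tileB_step, hc, hdns]
            _ = (acc ++ parse_tileA dirs (c :: d :: rest'), []) := by
                rw [hrec]
                simp only [parse_tileA, List.take, List.drop]
                rw [if_pos hpair]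
                simp
      · have hrec := ih rest (by simp at hlen ⊢; omega) (pvWF_tail hwf)
          (acc ++ [(pvLookup dirs (String.ofList [c])).getD (0, 0)])
        have hpair : ¬ ((c :: rest.take 1) = ['n','w'] ∨ (c :: rest.take 1) = ['n','e'] ∨
            (c :: rest.take 1) = ['s','w'] ∨ (c :: rest.take 1) = ['s','e']) := by
          intro h
          rcases h with h | h | h | h <;> (apply hc; simp at h) <;> tauto
        calc ((c :: rest).foldl (parse_tileB_step dirs) (acc, ([] : List Char)))
            = rest.foldl (parse_tileB_step dirs)
                (acc ++ [(pvLookup dirs (String.ofList [c])).getD (0, 0)], []) := by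
              simp [List.foldl, parse_tileB_step, hc]
          _ = (acc ++ parse_tileA dirs (c :: rest), []) := by
              rw [hrec]
              simp only [parse_tileA]
              rw [if_neg hpair]
              simp

-- ===== VERDICT (by name: the statement is the Claim_ definition above) =====
theorem parse_tile_spec : Claim_equal_parse_tile := by
  intro tile dirs _ hpre
  unfold Spec_parse_tile parse_tile parse_tile_alt
  have hwf : pvWF tile.toList := fun i hi hc => by
    have := (hpre i hi).1 hc
    exact ⟨this.1, this.2.1⟩
  rw [pv_main dirs tile.toList.length tile.toList le_rfl hwf []]
  simp
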